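-- pv_equiv track=rewrite | github.com/weselyj/Clarity-OMR-Train-RADIO | eval/run_subproject2_gate.py | _check_marker_structure
-- ===== SOURCE A (Python) =====
-- from typing import Dict, List
--
-- def _check_marker_structure(tokens: List[str]) -> bool:
--     """A decoded sequence is marker-correct iff:
--       - For each <staff_start>, the next token is <staff_idx_N>
--       - <staff_idx_N> values are strictly ascending and start at 0
--       - Number of distinct markers equals number of <staff_start>
--     """
--     starts = [i for i, t in enumerate(tokens) if t == "<staff_start>"]
--     if not starts:
--         return True  # nothing to check
--     seen = []
--     for s in starts:
--         if s + 1 >= len(tokens):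
--             return False
--         nxt = tokens[s + 1]
--         if not nxt.startswith("<staff_idx_"):
--             return False
--         try:
--             idx = int(nxt[len("<staff_idx_"):-1])
--         except ValueError:
--             return False
--         seen.append(idx)
--     return seen == list(range(len(seen)))
-- ===== SOURCE B (Python) =====
-- def _check_marker_structure(tokens):
--     # Right-to-left scan: pre-count the markers, then check that the staff
--     # indices count down from total-1 to 0 while walking the sequence backwards.
--     expect = tokens.count("<staff_start>")
--     for i, t in reversed(list(enumerate(tokens))):
--         if t == "<staff_start>":
--             if i + 1 >= len(tokens):
--                 return False
--             nxt = tokens[i + 1]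
--             if not nxt.startswith("<staff_idx_"):
--                 return False
--             try:
--                 idx = int(nxt[len("<staff_idx_"):-1])
--             except ValueError:
--                 return False
--             expect -= 1
--             if idx != expect:
--                 return False
--     return True
-- ===== Notes on version B (the rewrite author's own statement) =====
-- stated objective: alternative
-- what changed: B pre-counts the <staff_start> markers, then walks the token list RIGHT-TO-LEFT checking that the staff indices count DOWN from total-1 to 0, instead of A's forward accumulation of all indices followed by a comparison with range(n).
import Mathlib
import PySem

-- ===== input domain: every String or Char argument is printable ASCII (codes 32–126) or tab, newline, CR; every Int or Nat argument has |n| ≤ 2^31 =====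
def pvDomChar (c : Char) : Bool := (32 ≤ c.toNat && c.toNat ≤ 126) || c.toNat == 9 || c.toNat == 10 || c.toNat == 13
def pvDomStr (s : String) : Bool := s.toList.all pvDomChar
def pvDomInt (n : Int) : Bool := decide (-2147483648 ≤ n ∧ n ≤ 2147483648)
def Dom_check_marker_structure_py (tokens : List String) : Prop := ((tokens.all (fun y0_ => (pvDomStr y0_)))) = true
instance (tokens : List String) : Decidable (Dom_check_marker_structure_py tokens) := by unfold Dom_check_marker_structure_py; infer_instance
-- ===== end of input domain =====

-- B pre-counts the markers and scans the token list right-to-left checking indices count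
-- down from total-1 to 0, instead of A's forward accumulate-then-compare-with-range;
-- objective: alternative (same return value).

-- ===== PORT A =====
-- the 'for s in starts' loop, accumulating seen; at the end 'seen == list(range(len(seen)))'
def pvALoop (tokens : List String) : List Int → List Int → Bool
  | [], seen => decide (seen = (List.range seen.length).map (fun j => (j : Int)))
  | s :: rest, seen =>
    if s + 1 ≥ (tokens.length : Int) then false
    else
      let nxt := PySem.List.pyGetD tokens (s + 1) ""
      if ¬ PySem.Str.startswith nxt "<staff_idx_" then false
      else
        match PySem.Int.ofStr? (PySem.Str.slice nxt (some 11) (some (-1))) with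
        | none => false          -- ValueError
        | some idx => pvALoop tokens rest (seen ++ [idx])

def check_marker_structure_py (tokens : List String) : Bool :=
  let starts := (PySem.List.enumerate tokens 0).filterMap
    (fun p => if p.2 = "<staff_start>" then some p.1 else none)
  if starts = [] then true
  else pvALoop tokens starts []

-- ===== PORT B =====
-- 'for i, t in reversed(list(enumerate(tokens)))' loop with the pre-counted total decremented
def pvBLoop (tokens : List String) : List (Int × String) → Int → Bool
  | [], _ => true
  | (i, t) :: rest, expect =>
    if t = "<staff_start>" then
      if i + 1 ≥ (tokens.length : Int) then false
      else
        let nxt := PySem.List.pyGetD tokens (i + 1) ""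
        if ¬ PySem.Str.startswith nxt "<staff_idx_" then false
        else
          match PySem.Int.ofStr? (PySem.Str.slice nxt (some 11) (some (-1))) with
          | none => false        -- ValueError
          | some idx =>
            if idx ≠ expect - 1 then false
            else pvBLoop tokens rest (expect - 1)
    else pvBLoop tokens rest expect

def check_marker_structure_py_alt (tokens : List String) : Bool :=
  pvBLoop tokens ((PySem.List.enumerate tokens 0).reverse)
    ((PySem.List.count tokens "<staff_start>" : Nat) : Int)

-- ===== PRECONDITION & SPEC =====
def Spec_check_marker_structure_py (tokens : List String) (out : Bool) : Prop := out = check_marker_structure_py_alt tokens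
instance (tokens : List String) (out : Bool) : Decidable (Spec_check_marker_structure_py tokens out) := by unfold Spec_check_marker_structure_py; infer_instance

-- ===== CLAIM (what is proved, stated in full; the proofs are below) =====
def Claim_equal_check_marker_structure_py : Prop := ∀ (tokens : List String), Dom_check_marker_structure_py tokens → Spec_check_marker_structure_py tokens (check_marker_structure_py tokens)

-- ===== LEMMAS AND PROOFS =====

-- the common per-start head computation: none = one of the False branches fires
def pvHead (tokens : List String) (i : Int) : Option Int :=
  if i + 1 ≥ (tokens.length : Int) then none
  else
    let nxt := PySem.List.pyGetD tokens (i + 1) ""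
    if ¬ PySem.Str.startswith nxt "<staff_idx_" then none
    else PySem.Int.ofStr? (PySem.Str.slice nxt (some 11) (some (-1)))

def pvRangeCast (n : Nat) : List Int := (List.range n).map (fun j => (j : Int))

-- forward reading of the check: the k-th start (counter c, c+1, …) parses to exactly c, c+1, …
def pvFwd (tokens : List String) : List Int → Int → Bool
  | [], _ => true
  | s :: r, c => (pvHead tokens s == some c) && pvFwd tokens r (c + 1)

-- backward reading: counter decremented before each comparison
def pvRev (tokens : List String) : List Int → Int → Bool
  | [], _ => true
  | s :: r, c => (pvHead tokens s == some (c - 1)) && pvRev tokens r (c - 1)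

theorem pvALoop_cons (tokens : List String) (s : Int) (rest : List Int) (seen : List Int) :
    pvALoop tokens (s :: rest) seen =
      match pvHead tokens s with
      | none => false
      | some idx => pvALoop tokens rest (seen ++ [idx]) := by
  simp only [pvALoop, pvHead]
  split_ifs with h1 h2 <;> simp

theorem pvRangeCast_succ (n : Nat) : pvRangeCast (n + 1) = pvRangeCast n ++ [(n : Int)] := by
  simp [pvRangeCast, List.range_succ]

theorem pvALoop_bad (tokens : List String) (rest : List Int) (seen : List Int)
    (h : seen ≠ pvRangeCast seen.length) : pvALoop tokens rest seen = false := by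
  induction rest generalizing seen with
  | nil => simpa [pvALoop, pvRangeCast] using h
  | cons s rest ih =>
    rw [pvALoop_cons]
    cases hh : pvHead tokens s with
    | none => rfl
    | some idx =>
      apply ih
      intro he
      apply h
      have hlen : (seen ++ [idx]).length = seen.length + 1 := by simp
      rw [hlen, pvRangeCast_succ] at he
      exact (List.append_inj he (by simp [pvRangeCast])).1

theorem pvALoop_eq_pvFwd (tokens : List String) (ss : List Int) (n : Nat) :
    pvALoop tokens ss (pvRangeCast n) = pvFwd tokens ss (n : Int) := by
  induction ss generalizing n with
  | nil => simp [pvALoop, pvFwd, pvRangeCast]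
  | cons s r ih =>
    rw [pvALoop_cons]
    cases hh : pvHead tokens s with
    | none => simp [pvFwd, hh]
    | some idx =>
      show pvALoop tokens r (pvRangeCast n ++ [idx]) = pvFwd tokens (s :: r) (n : Int)
      by_cases hi : idx = (n : Int)
      · subst hi
        rw [← pvRangeCast_succ, ih (n + 1)]
        simp [pvFwd, hh]
      · rw [pvALoop_bad]
        · simp [pvFwd, hh, hi]
        · intro he
          rw [show (pvRangeCast n ++ [idx]).length = n + 1 by simp [pvRangeCast],
            pvRangeCast_succ] at he
          exact hi (by simpa using (List.append_inj he (by simp [pvRangeCast])).2)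

theorem pvBLoop_cons_start (tokens : List String) (i : Int) (rest : List (Int × String)) (c : Int) :
    pvBLoop tokens ((i, "<staff_start>") :: rest) c =
      match pvHead tokens i with
      | none => false
      | some idx => if idx ≠ c - 1 then false else pvBLoop tokens rest (c - 1) := by
  simp only [pvBLoop, pvHead]
  split_ifs with h1 h2 <;> simp

theorem pvBLoop_eq_pvRev (tokens : List String) (l : List (Int × String)) (c : Int) :
    pvBLoop tokens l c =
      pvRev tokens (l.filterMap (fun p => if p.2 = "<staff_start>" then some p.1 else none)) c := by
  induction l generalizing c with
  | nil => simp [pvBLoop, pvRev]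
  | cons p rest ih =>
    obtain ⟨i, t⟩ := p
    by_cases ht : t = "<staff_start>"
    · subst ht
      rw [pvBLoop_cons_start,
        show List.filterMap (fun p => if p.2 = "<staff_start>" then some p.1 else none)
            ((i, "<staff_start>") :: rest)
          = i :: List.filterMap (fun p => if p.2 = "<staff_start>" then some p.1 else none) rest
          by simp]
      cases hh : pvHead tokens i with
      | none => simp [pvRev, hh]
      | some idx =>
        by_cases hi : idx = c - 1
        · simp [pvRev, hh, hi, ih]
        · simp [pvRev, hh, hi]
    · rw [show pvBLoop tokens ((i, t) :: rest) c = pvBLoop tokens rest c by simp [pvBLoop, ht],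
        show List.filterMap (fun p => if p.2 = "<staff_start>" then some p.1 else none)
            ((i, t) :: rest)
          = List.filterMap (fun p => if p.2 = "<staff_start>" then some p.1 else none) rest
          by simp [ht]]
      exact ih c

theorem pvRev_append (tokens : List String) (l1 l2 : List Int) (c : Int) :
    pvRev tokens (l1 ++ l2) c = (pvRev tokens l1 c && pvRev tokens l2 (c - l1.length)) := by
  induction l1 generalizing c with
  | nil => simp [pvRev]
  | cons s r ih =>
    simp only [List.cons_append, pvRev, ih (c - 1), Bool.and_assoc, List.length_cons]
    push_cast
    ring_nf

theorem pvRev_reverse (tokens : List String) (ss : List Int) (c : Int) :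
    pvRev tokens ss.reverse c = pvFwd tokens ss (c - ss.length) := by
  induction ss generalizing c with
  | nil => simp [pvRev, pvFwd]
  | cons a r ih =>
    rw [List.reverse_cons, pvRev_append, ih]
    simp only [pvRev, pvFwd, List.length_reverse, Bool.and_true, List.length_cons]
    rw [Bool.and_comm]
    push_cast
    ring_nf

theorem pvStartsLen (tokens : List String) (k : Int) :
    ((PySem.List.enumerate tokens k).filterMap
      (fun p => if p.2 = "<staff_start>" then some p.1 else none)).length
      = List.count "<staff_start>" tokens := by
  induction tokens generalizing k with
  | nil => simp [PySem.List.enumerate_nil]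
  | cons x xs ih =>
    rw [PySem.List.enumerate_cons]
    by_cases hx : x = "<staff_start>"
    · simp [hx, ih]
    · simp [hx, ih]

-- ===== VERDICT (by name: the statement is the Claim_ definition above) =====
theorem check_marker_structure_py_spec : Claim_equal_check_marker_structure_py := by
  intro tokens _
  unfold Spec_check_marker_structure_py check_marker_structure_py check_marker_structure_py_alt
  rw [pvBLoop_eq_pvRev, List.filterMap_reverse, pvRev_reverse, pvStartsLen,
    PySem.List.count_eq, sub_self]
  by_cases hs : (PySem.List.enumerate tokens 0).filterMap
      (fun p => if p.2 = "<staff_start>" then some p.1 else none) = []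
  · simp [hs, pvFwd]
  · simp only [hs, if_false]
    have h0 := pvALoop_eq_pvFwd tokens ((PySem.List.enumerate tokens 0).filterMap
      (fun p => if p.2 = "<staff_start>" then some p.1 else none)) 0
    simpa [pvRangeCast] using h0
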